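-- pv_equiv track=rewrite | github.com/hermanmichaels/rl_book | rl_book/env.py | obs_to_state
-- ===== SOURCE A (Python) =====
-- def obs_to_state(obs, start_pos=None):
--     board = obs  # shape: (3, 3, 2)
--     state_flat = []
--
--     for row in range(3):
--         for col in range(3):
--             if board[row][col][0] == 1:
--                 state_flat.append(1)  # player 1
--             elif board[row][col][1] == 1:
--                 state_flat.append(2)  # player 2
--             else:
--                 state_flat.append(0)  # empty
--
--     if start_pos:
--         state_flat.append(start_pos)
--
--     # Convert base-3 list to integer
--     state = 0
--     for i, val in enumerate(state_flat):
--         state += val * (3**i)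
--     return state
-- ===== SOURCE B (Python) =====
-- def obs_to_state(obs, start_pos=None):
--     state = 0
--     weight = 1
--     for row in range(3):
--         for col in range(3):
--             cell = obs[row][col]
--             if cell[0] == 1:
--                 digit = 1
--             elif cell[1] == 1:
--                 digit = 2
--             else:
--                 digit = 0
--             state += digit * weight
--             weight *= 3
--     if start_pos:
--         state += start_pos * weight
--     return state
-- ===== Notes on version B (the rewrite author's own statement) =====
-- stated objective: simpler
-- what changed: B drops the intermediate state_flat list and the second enumerate loop, accumulating each base-3 digit directly into the result with a running weight in one fused pass.
import Mathlib
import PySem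

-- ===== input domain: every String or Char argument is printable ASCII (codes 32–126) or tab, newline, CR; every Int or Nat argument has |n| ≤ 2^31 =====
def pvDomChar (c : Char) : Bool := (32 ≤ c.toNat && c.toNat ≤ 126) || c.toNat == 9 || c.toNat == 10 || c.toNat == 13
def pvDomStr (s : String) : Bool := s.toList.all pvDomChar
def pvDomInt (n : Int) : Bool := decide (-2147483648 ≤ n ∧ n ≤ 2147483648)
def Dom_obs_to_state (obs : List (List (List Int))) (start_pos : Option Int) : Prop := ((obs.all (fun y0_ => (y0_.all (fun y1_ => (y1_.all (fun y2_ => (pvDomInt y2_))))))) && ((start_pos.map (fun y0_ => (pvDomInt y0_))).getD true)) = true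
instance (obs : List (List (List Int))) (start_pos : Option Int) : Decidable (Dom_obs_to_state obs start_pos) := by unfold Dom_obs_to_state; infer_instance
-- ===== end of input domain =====

-- B fuses A's two loops: each base-3 digit is accumulated directly with a running weight, no intermediate state_flat list (same return value; no side effects involved).

-- ===== PORT A =====
def obs_to_state (obs : List (List (List Int))) (start_pos : Option Int) : Int :=
  let state_flat : List Int :=
    (PySem.List.pyRange 0 3 1).foldl (fun acc row =>
      (PySem.List.pyRange 0 3 1).foldl (fun acc col =>
        if PySem.List.pyGetD (PySem.List.pyGetD (PySem.List.pyGetD obs row []) col []) 0 0 = 1 then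
          acc ++ [1]
        else if PySem.List.pyGetD (PySem.List.pyGetD (PySem.List.pyGetD obs row []) col []) 1 0 = 1 then
          acc ++ [2]
        else
          acc ++ [0]) acc) []
  let state_flat : List Int :=
    match start_pos with
    | some v => if v ≠ 0 then state_flat ++ [v] else state_flat
    | none => state_flat
  (PySem.List.enumerate state_flat).foldl (fun state p => state + p.2 * (3 : Int) ^ p.1.toNat) 0

-- ===== PORT B =====
def obs_to_state_alt (obs : List (List (List Int))) (start_pos : Option Int) : Int :=
  let sw : Int × Int :=
    (PySem.List.pyRange 0 3 1).foldl (fun sw row =>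
      (PySem.List.pyRange 0 3 1).foldl (fun (sw : Int × Int) col =>
        let cell := PySem.List.pyGetD (PySem.List.pyGetD obs row []) col []
        let digit : Int :=
          if PySem.List.pyGetD cell 0 0 = 1 then 1
          else if PySem.List.pyGetD cell 1 0 = 1 then 2
          else 0
        (sw.1 + digit * sw.2, sw.2 * 3)) sw) (0, 1)
  match start_pos with
  | some v => if v ≠ 0 then sw.1 + v * sw.2 else sw.1
  | none => sw.1

-- ===== PRECONDITION & SPEC =====
-- Pre_ excludes exactly the inputs where Python A raises IndexError: fewer than 3 rows,
-- a row (among the first 3) with fewer than 3 cells, an empty cell, or a cell whose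
-- first entry is not 1 and that has no second entry.
def Pre_obs_to_state (obs : List (List (List Int))) (start_pos : Option Int) : Prop :=
  3 ≤ obs.length ∧ ∀ r < 3, 3 ≤ (obs.getD r []).length ∧
    ∀ c < 3, ((obs.getD r []).getD c []) ≠ [] ∧
      (((obs.getD r []).getD c []).getD 0 0 = 1 ∨ 2 ≤ ((obs.getD r []).getD c []).length)
instance (obs : List (List (List Int))) (start_pos : Option Int) : Decidable (Pre_obs_to_state obs start_pos) := by unfold Pre_obs_to_state; infer_instance

def pvWitness_obs_to_state : List (List (List Int)) × Option Int :=
  ([[[0,0],[1,0],[0,1]],[[0,0],[0,0],[1,0]],[[0,1],[0,0],[0,0]]], some 4)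

def Spec_obs_to_state (obs : List (List (List Int))) (start_pos : Option Int) (out : Int) : Prop := out = obs_to_state_alt obs start_pos
instance (obs : List (List (List Int))) (start_pos : Option Int) (out : Int) : Decidable (Spec_obs_to_state obs start_pos out) := by unfold Spec_obs_to_state; infer_instance

-- ===== CLAIM (what is proved, stated in full; the proofs are below) =====
def Claim_equal_obs_to_state : Prop := ∀ (obs : List (List (List Int))) (start_pos : Option Int), Dom_obs_to_state obs start_pos → Pre_obs_to_state obs start_pos → Spec_obs_to_state obs start_pos (obs_to_state obs start_pos)

-- ===== LEMMAS AND PROOFS =====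

-- collapse A's three append branches into one append of a conditional digit
theorem append_digit_ite {p q : Prop} [Decidable p] [Decidable q] (acc : List Int) :
    (if p then acc ++ [1] else if q then acc ++ [2] else acc ++ [(0 : Int)])
      = acc ++ [if p then 1 else if q then 2 else 0] := by
  split_ifs <;> rfl

-- ===== VERDICT (by name: the statement is the Claim_ definition above) =====
theorem obs_to_state_spec : Claim_equal_obs_to_state := by
  intro obs start_pos _ _
  unfold Spec_obs_to_state obs_to_state obs_to_state_alt
  simp only [show PySem.List.pyRange 0 3 1 = [0, 1, 2] from by decide, List.foldl,
    append_digit_ite, List.nil_append, List.cons_append, List.append_nil,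
    List.singleton_append, PySem.List.enumerate]
  cases start_pos with
  | none =>
      simp only [List.foldl, PySem.List.enumerate, Int.toNat_zero, Int.toNat_one, Int.reduceAdd,
        Int.reduceToNat]
      norm_num only
      try ring_nf
  | some v =>
      by_cases hv : v = 0 <;>
        simp only [hv, ne_eq, not_true_eq_false, not_false_eq_true, if_true, if_false,
          List.foldl, PySem.List.enumerate, List.cons_append, List.nil_append,
          Int.toNat_zero, Int.toNat_one, Int.reduceAdd, Int.reduceToNat] <;> norm_num only
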